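-- pv_equiv track=rewrite | github.com/sheldon123z/Rural-Low-Voltage-Detection | code/scripts/bindplotting/bindstyle_config.py | get_ranked_colors
-- ===== SOURCE A (Python) =====
-- COLORS = {
--     # 主要颜色 (Primary colors)
--     'orange': '#E69F00',      # 橙色 - 最佳/突出
--     'sky_blue': '#56B4E9',    # 天蓝色
--     'green': '#009E73',       # 青绿色
--     'yellow': '#F0E442',      # 黄色
--     'blue': '#0072B2',        # 深蓝色
--     'vermillion': '#D55E00',  # 朱红色 - 警告/次佳
--     'purple': '#CC79A7',      # 紫红色
--     'black': '#000000',       # 黑色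
--     'gray': '#999999',        # 灰色
--
--     # 语义化颜色 (Semantic colors)
--     'best': '#E69F00',        # 最佳模型 - 橙色
--     'second': '#56B4E9',      # 次佳模型 - 天蓝色
--     'third': '#009E73',       # 第三名 - 青绿色
--     'baseline': '#999999',    # 基线模型 - 灰色
--     'highlight': '#D55E00',   # 高亮 - 朱红色
--     'positive': '#009E73',    # 正面 - 青绿色
--     'negative': '#D55E00',    # 负面 - 朱红色
-- }
--
-- def get_ranked_colors(n, highlight_top=3):
--     """
--     获取排名颜色（前几名用醒目颜色）
--     Get ranked colors with top performers highlighted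
--
--     Args:
--         n: 总数量
--         highlight_top: 需要高亮的前几名
--
--     Returns:
--         颜色列表
--     """
--     highlight_colors = [COLORS['best'], COLORS['second'], COLORS['third']]
--     colors = []
--
--     for i in range(n):
--         if i < min(highlight_top, len(highlight_colors)):
--             colors.append(highlight_colors[i])
--         else:
--             colors.append(COLORS['gray'])
--
--     return colors
-- ===== SOURCE B (Python) =====
-- COLORS = {
--     'orange': '#E69F00', 'sky_blue': '#56B4E9', 'green': '#009E73',
--     'yellow': '#F0E442', 'blue': '#0072B2', 'vermillion': '#D55E00',
--     'purple': '#CC79A7', 'black': '#000000', 'gray': '#999999',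
--     'best': '#E69F00', 'second': '#56B4E9', 'third': '#009E73',
--     'baseline': '#999999', 'highlight': '#D55E00',
--     'positive': '#009E73', 'negative': '#D55E00',
-- }
--
-- def get_ranked_colors(n, highlight_top=3):
--     highlight_colors = [COLORS['best'], COLORS['second'], COLORS['third']]
--     k = max(0, min(highlight_top, len(highlight_colors), n))
--     return highlight_colors[:k] + [COLORS['gray']] * (n - k)
-- ===== Notes on version B (the rewrite author's own statement) =====
-- stated objective: simpler
-- what changed: Replaces the index loop with its per-element branch by a clamped count k and two bulk operations: slice the highlight list to k and append (n-k) copies of gray.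
import Mathlib
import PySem

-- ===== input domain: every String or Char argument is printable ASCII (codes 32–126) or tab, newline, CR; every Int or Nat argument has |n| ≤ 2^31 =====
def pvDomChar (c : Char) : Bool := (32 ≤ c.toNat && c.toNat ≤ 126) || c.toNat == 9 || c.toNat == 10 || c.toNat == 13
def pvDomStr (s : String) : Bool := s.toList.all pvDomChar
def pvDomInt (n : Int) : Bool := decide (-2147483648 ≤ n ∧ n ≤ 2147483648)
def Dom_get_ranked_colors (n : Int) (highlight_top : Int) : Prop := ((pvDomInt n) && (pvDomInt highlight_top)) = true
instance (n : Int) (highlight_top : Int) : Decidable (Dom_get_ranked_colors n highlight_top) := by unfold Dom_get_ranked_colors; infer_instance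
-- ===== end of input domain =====

-- B replaces A's per-index loop-and-branch by a clamped count k, a slice and a bulk repeat (objective: simpler).

-- ===== PORT A =====
-- highlight_colors = [COLORS['best'], COLORS['second'], COLORS['third']]
def pvHl : List String := ["#E69F00", "#56B4E9", "#009E73"]

-- literal port of A's for-loop: colors starts [], append per i in range(n)
def get_ranked_colors (n : Int) (highlight_top : Int) : List String :=
  (PySem.List.pyRange 0 n 1).foldl
    (fun colors i =>
      if i < min highlight_top (pvHl.length : Int) then
        colors ++ [PySem.List.pyGetD pvHl i ""]   -- i is always in range here, so the default is never used
      else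
        colors ++ ["#999999"])
    []

-- ===== PORT B =====
def get_ranked_colors_alt (n : Int) (highlight_top : Int) : List String :=
  let k : Int := max 0 (min highlight_top (min (pvHl.length : Int) n))
  pvHl.take k.toNat ++ List.replicate (n - k).toNat "#999999"

-- ===== PRECONDITION & SPEC =====
def Spec_get_ranked_colors (n : Int) (highlight_top : Int) (out : List String) : Prop := out = get_ranked_colors_alt n highlight_top
instance (n : Int) (highlight_top : Int) (out : List String) : Decidable (Spec_get_ranked_colors n highlight_top out) := by unfold Spec_get_ranked_colors; infer_instance

-- ===== CLAIM (what is proved, stated in full; the proofs are below) =====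
def Claim_equal_get_ranked_colors : Prop := ∀ (n : Int) (highlight_top : Int), Dom_get_ranked_colors n highlight_top → Spec_get_ranked_colors n highlight_top (get_ranked_colors n highlight_top)

-- ===== LEMMAS AND PROOFS =====

-- A's append-and-branch fold is a map
lemma foldl_append_ite_map {α β : Type} (c : α → Prop) [DecidablePred c] (f g : α → β) :
    ∀ (l : List α) (acc : List β),
      l.foldl (fun acc i => if c i then acc ++ [f i] else acc ++ [g i]) acc
        = acc ++ l.map (fun i => if c i then f i else g i) := by
  intro l
  induction l with
  | nil => simp
  | cons x xs ih =>
      intro acc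
      by_cases h : c x <;> simp [List.foldl, h, ih]

-- A's result as a map over List.range n.toNat
lemma portA_eq_map (n ht : Int) :
    get_ranked_colors n ht =
      (List.range n.toNat).map
        (fun (k : Nat) => if (k : Int) < min ht 3 then PySem.List.pyGetD pvHl (k : Int) "" else "#999999") := by
  unfold get_ranked_colors
  have hr : PySem.List.pyRange 0 n 1 = (List.range n.toNat).map (fun (k : Nat) => (k : Int)) := by
    rw [PySem.List.pyRange_one]
    simp only [sub_zero, zero_add]
  rw [hr, List.foldl_map,
    foldl_append_ite_map (fun (y : Nat) => ((y : Int)) < min ht (pvHl.length : Int))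
      (fun (y : Nat) => PySem.List.pyGetD pvHl (y : Int) "") (fun _ => "#999999")]
  simp only [List.nil_append]
  apply List.map_congr_left
  intro a _
  simp [pvHl]

-- the generic shape lemma: a 0/1-cut map over range is take ++ replicate
lemma map_range_cut (m k' : Nat) (hk3 : k' ≤ 3) (hkm : k' ≤ m) :
    (List.range m).map
        (fun (k : Nat) => if k < k' then PySem.List.pyGetD pvHl (k : Int) "" else "#999999")
      = pvHl.take k' ++ List.replicate (m - k') "#999999" := by
  have hsplit : m = k' + (m - k') := by omega
  rw [hsplit, List.range_add, List.map_append]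
  congr 1
  · interval_cases k' <;> simp [pvHl, List.range_succ, PySem.List.pyGetD]
  · have h2 : ∀ x ∈ List.range (m - k'),
        ((fun (kk : Nat) => if kk < k' then PySem.List.pyGetD pvHl (kk : Int) "" else "#999999")
          ∘ (fun x => k' + x)) x = (fun (_ : Nat) => "#999999") x := by
      intro x _
      simp only [Function.comp]
      rw [if_neg (by omega)]
    rw [List.map_map, List.map_congr_left h2, List.map_const']
    simp

theorem portAB (n ht : Int) : get_ranked_colors n ht = get_ranked_colors_alt n ht := by
  rw [portA_eq_map]
  simp only [get_ranked_colors_alt]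
  have hlen : (pvHl.length : Int) = 3 := by simp [pvHl]
  rw [hlen]
  set k : Int := max 0 (min ht (min 3 n)) with hk
  have hk0 : 0 ≤ k := le_max_left _ _
  have hkm : k.toNat ≤ n.toNat := by omega
  have hk3 : k.toNat ≤ 3 := by omega
  rw [show (n - k).toNat = n.toNat - k.toNat by omega]
  rw [← map_range_cut n.toNat k.toNat hk3 hkm]
  apply List.map_congr_left
  intro a ha
  have ham : a < n.toNat := List.mem_range.mp ha
  have : (a : Int) < min ht 3 ↔ a < k.toNat := by omega
  by_cases h : (a : Int) < min ht 3
  · rw [if_pos h, if_pos (this.mp h)]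
  · rw [if_neg h, if_neg (fun hc => h (this.mpr hc))]

-- ===== VERDICT (by name: the statement is the Claim_ definition above) =====
theorem get_ranked_colors_spec : Claim_equal_get_ranked_colors := by
  intro n ht _
  unfold Spec_get_ranked_colors
  exact portAB n ht
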